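-- pv_equiv track=rewrite | github.com/beefchimi/beefskills | scripts/audit_fancy_quotes.py | iter_prose_offsets
-- ===== SOURCE A (Python) =====
-- def iter_prose_offsets(prose: str):
--     """Yield (offset, char) for each character that is in prose (not inside inline `...`)."""
--     i = 0
--     while i < len(prose):
--         if prose[i] == "`":
--             backtick_run = 0
--             j = i
--             while j < len(prose) and prose[j] == "`":
--                 backtick_run += 1
--                 j += 1
--             # Skip until we close with same run of backticks (or end of string)
--             start = j
--             while j <= len(prose):
--                 if j == len(prose):
--                     i = j
--                     break
--                 if prose[j] == "`":
--                     run = 0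
--                     k = j
--                     while k < len(prose) and prose[k] == "`":
--                         run += 1
--                         k += 1
--                     if run >= backtick_run:
--                         i = k
--                         break
--                     j = k
--                     continue
--                 j += 1
--             else:
--                 i = start
--             continue
--         yield i, prose[i]
--         i += 1
-- ===== SOURCE B (Python) =====
-- def iter_prose_offsets(prose: str):
--     """Yield (offset, char) for each character that is in prose (not inside inline `...`)."""
--     n = len(prose)
--     # phase 1: collect every maximal backtick run as (start, length)
--     runs = []
--     i = 0
--     while i < n:
--         if prose[i] == "`":
--             j = i
--             while j < n and prose[j] == "`":
--                 j += 1
--             runs.append((i, j - i))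
--             i = j
--         else:
--             i += 1
--     # phase 2: turn runs into masked intervals [a, b)
--     masked = []
--     r = 0
--     while r < len(runs):
--         start, length = runs[r]
--         s = r + 1
--         while s < len(runs) and runs[s][1] < length:
--             s += 1
--         if s < len(runs):
--             masked.append((start, runs[s][0] + runs[s][1]))
--             r = s + 1
--         else:
--             masked.append((start, n))
--             r = len(runs)
--     # phase 3: emit the gaps between masked intervals, in order
--     pos = 0
--     for a, b in masked:
--         for i in range(pos, a):
--             yield i, prose[i]
--         pos = b
--     for i in range(pos, n):
--         yield i, prose[i]
-- ===== Notes on version B (the rewrite author's own statement) =====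
-- stated objective: alternative
-- what changed: Replaces A's single nested char-by-char scan (which skips masked code spans while walking) by three separate passes: collect all maximal backtick runs, pair each opener run with the first later run of length >= it to form masked intervals, then emit (offset, char) for the gaps between intervals.
import Mathlib
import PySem

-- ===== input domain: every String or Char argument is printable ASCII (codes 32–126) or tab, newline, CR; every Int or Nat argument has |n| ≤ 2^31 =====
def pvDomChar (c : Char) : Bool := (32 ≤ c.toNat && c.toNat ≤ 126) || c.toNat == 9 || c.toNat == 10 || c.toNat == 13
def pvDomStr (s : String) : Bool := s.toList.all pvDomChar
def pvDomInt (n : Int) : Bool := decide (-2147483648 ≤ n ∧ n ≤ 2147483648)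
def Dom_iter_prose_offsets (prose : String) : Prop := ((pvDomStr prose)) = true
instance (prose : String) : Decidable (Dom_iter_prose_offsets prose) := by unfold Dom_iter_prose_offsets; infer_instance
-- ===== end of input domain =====

-- B replaces A's nested char-by-char skip loops by three passes (collect backtick runs,
-- pair runs into masked intervals, emit the gaps); objective: alternative decomposition.

-- ===== PORT A =====
-- length of the maximal leading backtick run (the inner `while … == "`"` counting loops)
def countRun : List Char → Nat
  | [] => 0
  | c :: rest => if c = '`' then countRun rest + 1 else 0

-- A's middle loop `while j <= len(prose): …` searching for a closing run of length ≥ n0;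
-- returns the suffix at the new position and the new position.  (The `else: i = start`
-- clause of the Python loop is unreachable, since the loop always exits via `break`.)
def aSkip : List Char → Nat → Nat → List Char × Nat
  | [], j, _ => ([], j)
  | c :: rest, j, n0 =>
    if c = '`' then
      if n0 ≤ countRun (c :: rest) then
        ((c :: rest).drop (countRun (c :: rest)), j + countRun (c :: rest))
      else
        aSkip ((c :: rest).drop (countRun (c :: rest))) (j + countRun (c :: rest)) n0
    else aSkip rest (j + 1) n0
  termination_by cs _ _ => cs.length
  decreasing_by
  · rename_i h _
    simp [countRun, h, List.length_drop]
  · simp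

-- result suffix of aSkip is never longer than its input (needed for aOuter's termination)
theorem aSkip_length_le (cs : List Char) (j n0 : Nat) :
    (aSkip cs j n0).1.length ≤ cs.length := by
  fun_induction aSkip cs j n0 with
  | case1 j n0 => simp
  | case2 rest j n0 h => simp [List.length_drop]
  | case3 rest j n0 h ih =>
      exact le_trans ih (by simp [List.length_drop])
  | case4 c rest j n0 h ih =>
      exact le_trans ih (by simp)

-- A's outer `while i < len(prose)` loop, on the suffix starting at absolute index i
def aOuter : List Char → Nat → List (Int × String)
  | [], _ => []
  | c :: rest, i =>
    if c = '`' then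
      aOuter (aSkip ((c :: rest).drop (countRun (c :: rest))) (i + countRun (c :: rest)) (countRun (c :: rest))).1
             (aSkip ((c :: rest).drop (countRun (c :: rest))) (i + countRun (c :: rest)) (countRun (c :: rest))).2
    else ((i : Int), String.mk [c]) :: aOuter rest (i + 1)
  termination_by cs _ => cs.length
  decreasing_by
  · rename_i h
    calc (aSkip ((c :: rest).drop (countRun (c :: rest))) (i + countRun (c :: rest)) (countRun (c :: rest))).1.length
        ≤ ((c :: rest).drop (countRun (c :: rest))).length := aSkip_length_le _ _ _
      _ < (c :: rest).length := by simp [countRun, h, List.length_drop]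
  · simp

def iter_prose_offsets (prose : String) : List (Int × String) := aOuter prose.toList 0

-- ===== PORT B =====
-- phase 1: every maximal backtick run as (start index, length)
def runsOf : List Char → Nat → List (Nat × Nat)
  | [], _ => []
  | c :: rest, i =>
    if c = '`' then
      (i, countRun (c :: rest)) ::
        runsOf ((c :: rest).drop (countRun (c :: rest))) (i + countRun (c :: rest))
    else runsOf rest (i + 1)
  termination_by cs _ => cs.length
  decreasing_by
  · rename_i h
    simp [countRun, h, List.length_drop]
  · simp

-- phase 2 inner scan `while s < len(runs) and runs[s][1] < length: s += 1`
def findClose (n0 : Nat) : List (Nat × Nat) → Option ((Nat × Nat) × List (Nat × Nat))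
  | [] => none
  | (st, l) :: r => if l < n0 then findClose n0 r else some ((st, l), r)

theorem findClose_length {n0 : Nat} {rs r' : List (Nat × Nat)} {p : Nat × Nat}
    (h : findClose n0 rs = some (p, r')) : r'.length < rs.length := by
  induction rs with
  | nil => simp [findClose] at h
  | cons q t ih =>
      obtain ⟨st, l⟩ := q
      by_cases hl : l < n0
      · simp only [findClose, if_pos hl] at h
        exact Nat.lt_succ_of_lt (ih h)
      · simp only [findClose, if_neg hl, Option.some.injEq, Prod.mk.injEq] at h
        simp [← h.2]

-- phase 2 outer loop: pair each opener with the first following run of length ≥ it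
def maskOf (n : Nat) : List (Nat × Nat) → List (Nat × Nat)
  | [] => []
  | (start, len) :: rest =>
    match h : findClose len rest with
    | some (p, r') => (start, p.1 + p.2) :: maskOf n r'
    | none => [(start, n)]
  termination_by rs => rs.length
  decreasing_by exact Nat.lt_succ_of_lt (findClose_length h)

-- phase 3: `for i in range(pos, a): yield i, prose[i]` — i is always < L.length at use,
-- so getD's default is never taken and this is exact for prose[i]
def emitRange (L : List Char) (a b : Nat) : List (Int × String) :=
  (List.range' a (b - a)).map fun (i : Nat) => ((i : Int), String.mk [L.getD i ' '])

def emitGaps (L : List Char) (pos : Nat) : List (Nat × Nat) → List (Int × String)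
  | [] => emitRange L pos L.length
  | (a, b) :: ms => emitRange L pos a ++ emitGaps L b ms

def iter_prose_offsets_alt (prose : String) : List (Int × String) :=
  emitGaps prose.toList 0 (maskOf prose.toList.length (runsOf prose.toList 0))

-- ===== PRECONDITION & SPEC =====
def Spec_iter_prose_offsets (prose : String) (out : List (Int × String)) : Prop := out = iter_prose_offsets_alt prose
instance (prose : String) (out : List (Int × String)) : Decidable (Spec_iter_prose_offsets prose out) := by unfold Spec_iter_prose_offsets; infer_instance

-- ===== CLAIM (what is proved, stated in full; the proofs are below) =====
def Claim_equal_iter_prose_offsets : Prop := ∀ (prose : String), Dom_iter_prose_offsets prose → Spec_iter_prose_offsets prose (iter_prose_offsets prose)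

-- ===== LEMMAS AND PROOFS =====

theorem countRun_le (cs : List Char) : countRun cs ≤ cs.length := by
  induction cs with
  | nil => simp [countRun]
  | cons c rest ih => by_cases h : c = '`' <;> simp [countRun, h] <;> omega

-- every run produced by runsOf starts at or after i, has positive length, and ends within the suffix
theorem runsOf_bounds (cs : List Char) (i : Nat) :
    ∀ p ∈ runsOf cs i, i ≤ p.1 ∧ 1 ≤ p.2 ∧ p.1 + p.2 ≤ i + cs.length := by
  fun_induction runsOf cs i with
  | case1 i => simp
  | case2 rest i ih =>
      intro p hp
      simp only [List.mem_cons] at hp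
      rcases hp with rfl | hp
      · refine ⟨le_refl _, by simp [countRun], ?_⟩
        have := countRun_le ('`' :: rest); omega
      · have := ih p hp
        have h2 := countRun_le ('`' :: rest)
        simp [List.length_drop] at this ⊢
        omega
  | case3 c rest i h ih =>
      intro p hp
      have := ih p hp
      simp at this ⊢
      omega

-- the characterisation of A's skip loop in terms of B's run list and findClose
theorem aSkip_spec (cs : List Char) (j n0 : Nat) :
    (findClose n0 (runsOf cs j) = none → aSkip cs j n0 = ([], j + cs.length))
    ∧ (∀ (p : Nat × Nat) (rem : List (Nat × Nat)), findClose n0 (runsOf cs j) = some (p, rem) →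
        aSkip cs j n0 = (cs.drop (p.1 + p.2 - j), p.1 + p.2)
        ∧ runsOf (cs.drop (p.1 + p.2 - j)) (p.1 + p.2) = rem
        ∧ j ≤ p.1 ∧ 1 ≤ p.2 ∧ p.1 + p.2 ≤ j + cs.length) := by
  fun_induction aSkip cs j n0 with
  | case1 j n0 =>
      refine ⟨fun _ => by simp, fun p rem hc => ?_⟩
      simp [runsOf, findClose] at hc
  | case2 rest j n0 hle =>
      have hr1 : 1 ≤ countRun ('`' :: rest) := by simp [countRun]
      have hrle : countRun ('`' :: rest) ≤ rest.length + 1 := by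
        simpa using countRun_le ('`' :: rest)
      constructor
      · intro hc
        rw [runsOf, if_pos rfl] at hc
        rw [findClose] at hc
        rw [if_neg (by omega)] at hc
        exact absurd hc (by simp)
      · intro p rem hc
        rw [runsOf, if_pos rfl] at hc
        rw [findClose] at hc
        rw [if_neg (by omega)] at hc
        simp only [Option.some.injEq, Prod.mk.injEq] at hc
        obtain ⟨hp, hrem⟩ := hc
        subst hp; subst hrem
        have e : j + countRun ('`' :: rest) - j = countRun ('`' :: rest) := by omega
        refine ⟨by dsimp only; rw [e], by dsimp only; rw [e], le_refl _, hr1, ?_⟩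
        dsimp only
        simp only [List.length_cons]
        omega
  | case3 rest j n0 hle ih =>
      have hr1 : 1 ≤ countRun ('`' :: rest) := by simp [countRun]
      have hrle : countRun ('`' :: rest) ≤ rest.length + 1 := by
        simpa using countRun_le ('`' :: rest)
      constructor
      · intro hc
        rw [runsOf, if_pos rfl] at hc
        rw [findClose] at hc
        rw [if_pos (by omega)] at hc
        rw [ih.1 hc]
        simp only [List.length_drop, List.length_cons, Prod.mk.injEq]
        refine ⟨trivial, ?_⟩
        omega
      · intro p rem hc
        rw [runsOf, if_pos rfl] at hc
        rw [findClose] at hc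
        rw [if_pos (by omega)] at hc
        obtain ⟨h1, h2, h3, h4, h5⟩ := ih.2 p rem hc
        have hd : (('`' :: rest).drop (countRun ('`' :: rest))).drop (p.1 + p.2 - (j + countRun ('`' :: rest)))
            = ('`' :: rest).drop (p.1 + p.2 - j) := by
          rw [List.drop_drop]; congr 1; omega
        refine ⟨by rw [h1, hd], by rw [← hd]; exact h2, by omega, h4, ?_⟩
        simp only [List.length_drop, List.length_cons] at h5 ⊢
        omega
  | case4 c rest j n0 h ih =>
      constructor
      · intro hc
        rw [runsOf, if_neg h] at hc
        rw [ih.1 hc]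
        simp only [List.length_cons, Prod.mk.injEq]
        refine ⟨trivial, ?_⟩
        omega
      · intro p rem hc
        rw [runsOf, if_neg h] at hc
        obtain ⟨h1, h2, h3, h4, h5⟩ := ih.2 p rem hc
        have hd : rest.drop (p.1 + p.2 - (j + 1)) = (c :: rest).drop (p.1 + p.2 - j) := by
          rw [show p.1 + p.2 - j = (p.1 + p.2 - (j + 1)) + 1 from by omega, List.drop_succ_cons]
        refine ⟨by rw [h1, hd], by rw [← hd]; exact h2, by omega, h4, by simp only [List.length_cons] at h5 ⊢; omega⟩

theorem maskOf_cons_some {len : Nat} {rest r' : List (Nat × Nat)} {p : Nat × Nat}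
    (n start : Nat) (h : findClose len rest = some (p, r')) :
    maskOf n ((start, len) :: rest) = (start, p.1 + p.2) :: maskOf n r' := by
  rw [maskOf]
  split <;> simp_all

theorem maskOf_cons_none {len : Nat} {rest : List (Nat × Nat)}
    (n start : Nat) (h : findClose len rest = none) :
    maskOf n ((start, len) :: rest) = [(start, n)] := by
  rw [maskOf]
  split <;> simp_all

theorem emitRange_cons (L : List Char) (a b : Nat) (h : a < b) :
    emitRange L a b = ((a : Int), String.mk [L.getD a ' ']) :: emitRange L (a + 1) b := by
  unfold emitRange
  have : b - a = (b - (a + 1)) + 1 := by omega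
  rw [this, List.range'_succ]
  simp

theorem getD_of_drop {L : List Char} {i : Nat} {c : Char} {rest : List Char}
    (h : L.drop i = c :: rest) : L.getD i ' ' = c := by
  have h0 : L[i]? = some c := by
    have h1 : (L.drop i)[0]? = L[i + 0]? := List.getElem?_drop
    simpa [h] using h1.symm
  simp [List.getD, h0]

-- both sides vanish once the scan position has reached the end of the string
theorem main_base (L : List Char) (i : Nat) (h : L.length ≤ i) :
    aOuter (L.drop i) i = emitGaps L i (maskOf L.length (runsOf (L.drop i) i)) := by
  rw [List.drop_eq_nil_of_le h]
  simp [aOuter, runsOf, maskOf, emitGaps, emitRange, Nat.sub_eq_zero_of_le h]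

-- the main induction: A's outer loop on the suffix at i equals B's gap emission
theorem main_lemma (k : Nat) : ∀ (L : List Char) (i : Nat), L.length ≤ i + k →
    aOuter (L.drop i) i = emitGaps L i (maskOf L.length (runsOf (L.drop i) i)) := by
  induction k with
  | zero => intro L i h; exact main_base L i (by omega)
  | succ k ih =>
      intro L i h
      cases hdrop : L.drop i with
      | nil =>
          have hle : L.length ≤ i := by
            by_contra h'
            push_neg at h'
            have : (L.drop i).length = L.length - i := List.length_drop
            rw [hdrop] at this
            simp at this
            omega
          have hb := main_base L i hle
          rw [hdrop] at hb
          exact hb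
      | cons c rest =>
          have hi : i < L.length := by
            by_contra h'
            push_neg at h'
            rw [List.drop_eq_nil_of_le h'] at hdrop
            cases hdrop
          by_cases hc : c = '`'
          · subst hc
            rw [aOuter, if_pos rfl]
            rw [runsOf, if_pos rfl]
            have hr1 : 1 ≤ countRun ('`' :: rest) := by simp [countRun]
            set r := countRun ('`' :: rest) with hr
            cases hfc : findClose r
                (runsOf (('`' :: rest).drop r) (i + r)) with
            | none =>
                have hs := (aSkip_spec (('`' :: rest).drop r)
                  (i + r) r).1 hfc
                rw [hs, maskOf_cons_none _ _ hfc]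
                simp [aOuter, emitGaps, emitRange]
            | some pr =>
                obtain ⟨p, rem⟩ := pr
                obtain ⟨h1, h2, h3, h4, h5⟩ := (aSkip_spec (('`' :: rest).drop r)
                  (i + r) r).2 p rem hfc
                have hL : ((('`' :: rest)).drop r).drop
                    (p.1 + p.2 - (i + r)) = L.drop (p.1 + p.2) := by
                  rw [← hdrop, List.drop_drop, List.drop_drop]
                  congr 1
                  omega
                rw [h1, maskOf_cons_some _ _ hfc]
                rw [hL] at h2
                dsimp only
                rw [hL]
                rw [ih L (p.1 + p.2) (by omega), h2]
                simp [emitGaps, emitRange]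
          · rw [aOuter, if_neg hc]
            rw [runsOf, if_neg hc]
            have hrest : L.drop (i + 1) = rest := by
              calc L.drop (i + 1) = (L.drop i).drop 1 := (List.drop_drop).symm
                _ = rest := by rw [hdrop]; rfl
            have hout := ih L (i + 1) (by omega)
            rw [hrest] at hout
            rw [hout]
            have hchar : L.getD i ' ' = c := getD_of_drop hdrop
            cases hrs : runsOf rest (i + 1) with
            | nil =>
                simp only [maskOf, emitGaps]
                rw [emitRange_cons L i L.length hi, hchar]
            | cons q rs' =>
                obtain ⟨st, l⟩ := q
                have hsge : i + 1 ≤ st := by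
                  have := runsOf_bounds rest (i + 1) (st, l) (by rw [hrs]; exact List.mem_cons_self)
                  exact this.1
                cases hfc : findClose l rs' with
                | none =>
                    rw [maskOf_cons_none _ _ hfc]
                    simp only [emitGaps]
                    rw [emitRange_cons L i st (by omega), hchar, List.cons_append]
                | some pr =>
                    obtain ⟨p, rem⟩ := pr
                    rw [maskOf_cons_some _ _ hfc]
                    simp only [emitGaps]
                    rw [emitRange_cons L i st (by omega), hchar, List.cons_append]

-- ===== VERDICT (by name: the statement is the Claim_ definition above) =====
theorem iter_prose_offsets_spec : Claim_equal_iter_prose_offsets := by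
  intro prose _
  unfold Spec_iter_prose_offsets iter_prose_offsets iter_prose_offsets_alt
  have := main_lemma prose.toList.length prose.toList 0 (by omega)
  simpa using this
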